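-- pv_equiv track=rewrite | github.com/Inn0cent/Bio-sum | dp_code.py | trackBack
-- ===== SOURCE A (Python) =====
-- def trackBack(backtrackMatrix, seq1, seq2):
--     i = len(seq1)
--     j = len(seq2)
--     fin1 = ''
--     fin2 = ''
--     current = backtrackMatrix[i][j]
--     while current != "E":
--         if current == "D":
--             i -= 1
--             j -= 1
--             fin1 += seq1[j]
--             fin2 += seq2[i]
--         elif current == "L":
--             j -= 1
--             fin1 += seq1[j]
--             fin2 += '-'
--         elif current == "U":
--             i -= 1
--             fin1 += '-'
--             fin2 += seq2[i]
--         current = backtrackMatrix[i][j]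
--     return fin1[::-1], fin2[::-1]
-- ===== SOURCE B (Python) =====
-- def trackBack(backtrackMatrix, seq1, seq2):
--     # Two-phase decomposition: first walk the pointer chain and record the
--     # raw path (pointer, i, j); then build each output string in a separate
--     # pass over the reversed path.  No per-step string appends, no final
--     # string reversal.
--     path = []
--     i = len(seq1)
--     j = len(seq2)
--     current = backtrackMatrix[i][j]
--     while current != "E":
--         path.append((current, i, j))
--         if current == "D":
--             i -= 1
--             j -= 1
--         elif current == "L":
--             j -= 1
--         elif current == "U":
--             i -= 1
--         current = backtrackMatrix[i][j]
--     path.reverse()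
--     fin1 = ''.join(seq1[j - 1] if c in ("D", "L") else '-' for (c, i, j) in path)
--     fin2 = ''.join(seq2[i - 1] if c in ("D", "U") else '-' for (c, i, j) in path)
--     return fin1, fin2
-- ===== Notes on version B (the rewrite author's own statement) =====
-- stated objective: alternative
-- what changed: Replaces A's single loop that appends alignment characters to two accumulator strings and reverses them at the end with a two-phase decomposition: phase 1 records only the raw pointer path (pointer, i, j), phase 2 builds each output string in its own join over the reversed path, so no per-step string appends and no string reversal remain.
import Mathlib
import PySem

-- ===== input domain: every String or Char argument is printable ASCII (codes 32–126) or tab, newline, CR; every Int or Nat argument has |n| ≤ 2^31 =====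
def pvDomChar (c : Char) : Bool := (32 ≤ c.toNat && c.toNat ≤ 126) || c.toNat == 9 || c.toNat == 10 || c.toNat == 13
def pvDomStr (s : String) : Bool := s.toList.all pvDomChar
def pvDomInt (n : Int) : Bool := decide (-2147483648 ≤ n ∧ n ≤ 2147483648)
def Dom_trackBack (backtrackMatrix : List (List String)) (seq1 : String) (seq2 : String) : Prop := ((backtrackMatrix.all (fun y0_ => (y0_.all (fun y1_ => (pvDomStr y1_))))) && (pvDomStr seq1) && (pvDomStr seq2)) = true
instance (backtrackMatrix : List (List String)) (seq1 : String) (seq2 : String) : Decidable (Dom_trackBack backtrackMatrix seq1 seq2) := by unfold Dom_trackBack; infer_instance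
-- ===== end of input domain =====

-- B replaces A's append-and-reverse while-loop by a two-phase decomposition:
-- record the raw pointer path first, then build each output string in a
-- separate pass over the reversed path; same return value, no speed claim.


-- ===== PORT A =====
-- A's while loop; `fuel` is only a termination device (each iteration decreases
-- i + j by at least 1, so the fuel passed below is never exhausted on any input
-- satisfying Pre_).  Index accesses use PySem.List.pyGet? (Python semantics incl.
-- negative wrap; none = IndexError, on which Python A raises — excluded by Pre_;
-- the port then returns the accumulators, a value the claim never compares).
-- A cell that is none of "E"/"D"/"L"/"U" makes Python A loop forever (also
-- excluded by Pre_); the port returns the accumulators there.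
def goA (M : List (List String)) (s1 s2 : List Char) : Nat → Int → Int → List Char → List Char → List Char × List Char
  | 0, _, _, f1, f2 => (f1, f2)
  | fuel + 1, i, j, f1, f2 =>
    match PySem.List.pyGet? M i with
    | none => (f1, f2)
    | some row =>
      match PySem.List.pyGet? row j with
      | none => (f1, f2)
      | some current =>
        if current = "E" then (f1, f2)
        else if current = "D" then
          match PySem.List.pyGet? s1 (j - 1), PySem.List.pyGet? s2 (i - 1) with
          | some c1, some c2 => goA M s1 s2 fuel (i - 1) (j - 1) (f1 ++ [c1]) (f2 ++ [c2])
          | _, _ => (f1, f2)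
        else if current = "L" then
          match PySem.List.pyGet? s1 (j - 1) with
          | some c1 => goA M s1 s2 fuel i (j - 1) (f1 ++ [c1]) (f2 ++ ['-'])
          | none => (f1, f2)
        else if current = "U" then
          match PySem.List.pyGet? s2 (i - 1) with
          | some c2 => goA M s1 s2 fuel (i - 1) j (f1 ++ ['-']) (f2 ++ [c2])
          | none => (f1, f2)
        else (f1, f2)

def trackBack (backtrackMatrix : List (List String)) (seq1 : String) (seq2 : String) : String × String :=
  let s1 := seq1.toList
  let s2 := seq2.toList
  let fuel := s1.length + s2.length + 2
  let p := goA backtrackMatrix s1 s2 fuel (s1.length : Int) (s2.length : Int) [] []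
  -- fin1[::-1], fin2[::-1] : string reversal
  (String.ofList p.1.reverse, String.ofList p.2.reverse)

-- ===== PORT B =====
-- Source B phase 1: walk the pointer chain recording (pointer, i, j); no sequence
-- characters are touched here.  Same fuel device (Source B's loop diverges on a
-- non-pointer cell — outside Pre_ — the port stops and returns the path so far;
-- likewise on a missing matrix cell, where Source B raises IndexError).
def goPath (M : List (List String)) : Nat → Int → Int → List (String × Int × Int) → List (String × Int × Int)
  | 0, _, _, acc => acc
  | fuel + 1, i, j, acc =>
    match PySem.List.pyGet? M i with
    | none => acc
    | some row =>
      match PySem.List.pyGet? row j with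
      | none => acc
      | some current =>
        if current = "E" then acc
        else if current = "D" then goPath M fuel (i - 1) (j - 1) (acc ++ [(current, i, j)])
        else if current = "L" then goPath M fuel i (j - 1) (acc ++ [(current, i, j)])
        else if current = "U" then goPath M fuel (i - 1) j (acc ++ [(current, i, j)])
        else acc

-- Source B phase 2: the two joins over the reversed path.  seq1[j-1]/seq2[i-1] via
-- pyGet? (exact Python indexing); the `.getD '?'` default is only reached where
-- Source B raises IndexError, outside Pre_.
def trackBack_alt (backtrackMatrix : List (List String)) (seq1 : String) (seq2 : String) : String × String :=
  let s1 := seq1.toList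
  let s2 := seq2.toList
  let fuel := s1.length + s2.length + 2
  let path := (goPath backtrackMatrix fuel (s1.length : Int) (s2.length : Int) []).reverse
  (String.ofList (path.map (fun p => if p.1 = "D" ∨ p.1 = "L" then (PySem.List.pyGet? s1 (p.2.2 - 1)).getD '?' else '-')),
   String.ofList (path.map (fun p => if p.1 = "D" ∨ p.1 = "U" then (PySem.List.pyGet? s2 (p.2.1 - 1)).getD '?' else '-')))

-- ===== PRECONDITION & SPEC =====
-- Pre_ is the standard validity condition of a backtrack-pointer matrix: starting
-- from cell (len seq1, len seq2), every visited cell exists, holds one of the four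
-- pointers "E"/"D"/"L"/"U", keeps the sequence indices it consumes non-negative and
-- in range, and the chain ends at "E".  Exactly there Python A returns normally;
-- outside it A raises IndexError or loops forever on a non-pointer cell.  One
-- narrowing: a chain that strays through Python's negative-index wraparound and
-- still happens to reach "E" also returns in A (and in B with the same value);
-- such accidental successes are excluded because the indices here are the
-- intended non-negative ones.  (The Nat argument only drives the structural
-- recursion — each pointer step decreases i + j, so seq1.length + seq2.length + 1
-- steps always suffice — and makes the condition evaluate by `decide`.)
def chainOK (M : List (List String)) (s1 s2 : List Char) : Nat → Int → Int → Bool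
  | 0, _, _ => false
  | n + 1, i, j =>
    match PySem.List.pyGet? M i with
    | none => false
    | some row =>
      match PySem.List.pyGet? row j with
      | none => false
      | some c =>
        if c = "E" then true
        else if c = "D" then
          decide (1 ≤ i) && decide (1 ≤ j) && (PySem.List.pyGet? s1 (j - 1)).isSome
            && (PySem.List.pyGet? s2 (i - 1)).isSome && chainOK M s1 s2 n (i - 1) (j - 1)
        else if c = "L" then
          decide (1 ≤ j) && (PySem.List.pyGet? s1 (j - 1)).isSome && chainOK M s1 s2 n i (j - 1)
        else if c = "U" then
          decide (1 ≤ i) && (PySem.List.pyGet? s2 (i - 1)).isSome && chainOK M s1 s2 n (i - 1) j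
        else false

def Pre_trackBack (backtrackMatrix : List (List String)) (seq1 : String) (seq2 : String) : Prop :=
  chainOK backtrackMatrix seq1.toList seq2.toList (seq1.toList.length + seq2.toList.length + 1)
    (seq1.toList.length : Int) (seq2.toList.length : Int) = true

instance (backtrackMatrix : List (List String)) (seq1 : String) (seq2 : String) : Decidable (Pre_trackBack backtrackMatrix seq1 seq2) := by
  unfold Pre_trackBack; infer_instance

def pvWitness_trackBack : List (List String) × String × String :=
  ([["E", "L"], ["U", "D"]], "a", "b")

def Spec_trackBack (backtrackMatrix : List (List String)) (seq1 : String) (seq2 : String) (out : String × String) : Prop := out = trackBack_alt backtrackMatrix seq1 seq2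
instance (backtrackMatrix : List (List String)) (seq1 : String) (seq2 : String) (out : String × String) : Decidable (Spec_trackBack backtrackMatrix seq1 seq2 out) := by unfold Spec_trackBack; infer_instance

-- ===== CLAIM =====
def Claim_equal_trackBack : Prop := ∀ (backtrackMatrix : List (List String)) (seq1 : String) (seq2 : String), Dom_trackBack backtrackMatrix seq1 seq2 → Pre_trackBack backtrackMatrix seq1 seq2 → Spec_trackBack backtrackMatrix seq1 seq2 (trackBack backtrackMatrix seq1 seq2)

-- ===== LEMMAS AND PROOFS =====

-- goPath's accumulator is a pure prefix.
theorem goPath_acc (M : List (List String)) :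
    ∀ (fuel : Nat) (i j : Int) (acc : List (String × Int × Int)),
      goPath M fuel i j acc = acc ++ goPath M fuel i j [] := by
  intro fuel
  induction fuel with
  | zero => intro i j acc; simp [goPath]
  | succ n ih =>
    intro i j acc
    simp only [goPath]
    cases hr : PySem.List.pyGet? M i with
    | none => simp
    | some row =>
      cases hc : PySem.List.pyGet? row j with
      | none => simp [hc]
      | some c =>
        simp only [hc]
        by_cases hE : c = "E"
        · simp [hE]
        by_cases hD : c = "D"
        · simp only [if_neg hE, if_pos hD]
          rw [ih _ _ (acc ++ _), ih _ _ ([] ++ _)]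
          simp
        by_cases hL : c = "L"
        · simp only [if_neg hE, if_neg hD, if_pos hL]
          rw [ih _ _ (acc ++ _), ih _ _ ([] ++ _)]
          simp
        by_cases hU : c = "U"
        · simp only [if_neg hE, if_neg hD, if_neg hL, if_pos hU]
          rw [ih _ _ (acc ++ _), ih _ _ ([] ++ _)]
          simp
        · simp [if_neg hD, if_neg hL, if_neg hU]

-- On a valid chain (chainOK with fuel n), A's loop with any fuel ≥ n produces
-- exactly the characters that B's per-step projections read off the path
-- produced with any fuel ≥ n, in walk order, appended to the accumulators.
theorem goA_eq_path (M : List (List String)) (s1 s2 : List Char) :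
    ∀ (n : Nat) (i j : Int), chainOK M s1 s2 n i j = true →
      ∀ (fa fb : Nat), n ≤ fa → n ≤ fb → ∀ (f1 f2 : List Char),
        goA M s1 s2 fa i j f1 f2
          = (f1 ++ (goPath M fb i j []).map (fun p => if p.1 = "D" ∨ p.1 = "L" then (PySem.List.pyGet? s1 (p.2.2 - 1)).getD '?' else '-'),
             f2 ++ (goPath M fb i j []).map (fun p => if p.1 = "D" ∨ p.1 = "U" then (PySem.List.pyGet? s2 (p.2.1 - 1)).getD '?' else '-')) := by
  intro n
  induction n with
  | zero => intro i j h; simp [chainOK] at h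
  | succ m ih =>
    intro i j h fa fb hfa hfb f1 f2
    obtain ⟨fa', rfl⟩ : ∃ k, fa = k + 1 := ⟨fa - 1, by omega⟩
    obtain ⟨fb', rfl⟩ : ∃ k, fb = k + 1 := ⟨fb - 1, by omega⟩
    simp only [chainOK] at h
    simp only [goA, goPath]
    cases hr : PySem.List.pyGet? M i with
    | none => simp [hr] at h
    | some row =>
      cases hc : PySem.List.pyGet? row j with
      | none => simp [hr, hc] at h
      | some c =>
        simp only [hr, hc] at h ⊢
        by_cases hE : c = "E"
        · simp [hE]
        by_cases hD : c = "D"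
        · simp only [if_neg hE, if_pos hD] at h ⊢
          simp only [Bool.and_eq_true, decide_eq_true_eq, Option.isSome_iff_exists] at h
          obtain ⟨⟨⟨⟨hi, hj⟩, c1, hc1⟩, c2, hc2⟩, hrec⟩ := h
          simp only [hc1, hc2]
          rw [goPath_acc, ih _ _ hrec fa' fb' (by omega) (by omega)]
          simp [hD, hc1, hc2]
        by_cases hL : c = "L"
        · simp only [if_neg hE, if_neg hD, if_pos hL] at h ⊢
          simp only [Bool.and_eq_true, decide_eq_true_eq, Option.isSome_iff_exists] at h
          obtain ⟨⟨hj, c1, hc1⟩, hrec⟩ := h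
          simp only [hc1]
          rw [goPath_acc, ih _ _ hrec fa' fb' (by omega) (by omega)]
          simp [hL, hc1]
        by_cases hU : c = "U"
        · simp only [if_neg hE, if_neg hD, if_neg hL, if_pos hU] at h ⊢
          simp only [Bool.and_eq_true, decide_eq_true_eq, Option.isSome_iff_exists] at h
          obtain ⟨⟨hi, c2, hc2⟩, hrec⟩ := h
          simp only [hc2]
          rw [goPath_acc, ih _ _ hrec fa' fb' (by omega) (by omega)]
          simp [hU, hc2]
        · simp [if_neg hE, if_neg hD, if_neg hL, if_neg hU] at h

-- ===== VERDICT =====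
theorem trackBack_spec : Claim_equal_trackBack := by
  intro M seq1 seq2 _ hpre
  unfold Pre_trackBack at hpre
  unfold Spec_trackBack trackBack trackBack_alt
  simp only []
  rw [goA_eq_path M seq1.toList seq2.toList _ _ _ hpre
      (seq1.toList.length + seq2.toList.length + 2)
      (seq1.toList.length + seq2.toList.length + 2) (by omega) (by omega) [] []]
  simp [List.map_reverse]
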